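-- pv_equiv track=rewrite | github.com/Av7danger/Cypher | src/tools/crypto/password_strength.py | _contains_sequence
-- ===== SOURCE A (Python) =====
-- def _contains_sequence(password):
--     """Check if the password contains sequential characters."""
--     sequences = [
--         "abcdefghijklmnopqrstuvwxyz",
--         "0123456789"
--     ]
--
--     for seq in sequences:
--         for i in range(len(seq) - 2):
--             if seq[i:i+3].lower() in password.lower():
--                 return True
--
--     return False
-- ===== SOURCE B (Python) =====
-- def _contains_sequence(password):
--     """Check if the password contains sequential characters."""
--     s = password.lower()
--     for a, b, c in zip(s, s[1:], s[2:]):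
--         if (ord(b) == ord(a) + 1 and ord(c) == ord(b) + 1
--                 and (('a' <= a and c <= 'z') or ('0' <= a and c <= '9'))):
--             return True
--     return False
-- ===== Notes on version B (the rewrite author's own statement) =====
-- stated objective: alternative
-- what changed: Instead of testing each of A's 32 precomputed 3-char reference triples as a substring of the lowercased password, B lowercases once and makes a single pass over windows of three consecutive characters, testing local consecutiveness (ord(b)==ord(a)+1, ord(c)==ord(b)+1 within a-z or 0-9).
import Mathlib
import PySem

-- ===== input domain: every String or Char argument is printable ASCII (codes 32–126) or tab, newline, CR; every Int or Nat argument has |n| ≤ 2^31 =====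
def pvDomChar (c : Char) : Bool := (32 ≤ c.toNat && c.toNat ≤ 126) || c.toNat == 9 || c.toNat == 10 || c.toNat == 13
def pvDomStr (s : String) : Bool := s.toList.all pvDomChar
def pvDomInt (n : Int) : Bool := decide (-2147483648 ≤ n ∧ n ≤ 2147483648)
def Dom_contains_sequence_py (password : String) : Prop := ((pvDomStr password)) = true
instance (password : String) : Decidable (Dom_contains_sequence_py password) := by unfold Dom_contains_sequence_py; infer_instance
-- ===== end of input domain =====

-- B replaces A's 32 substring searches (each precomputed 3-char reference triple tested
-- with 'in') by ONE left-to-right scan of the lowercased password that tests each window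
-- of three consecutive characters for local consecutiveness (objective: alternative,
-- single-pass; same return value on every input).

-- ===== PORT A =====
-- A: for seq in sequences / for i in range(len(seq)-2) with early return = List.any;
-- seq[i:i+3] = slice, .lower() = Chars.lower, 'in password.lower()' = Chars.isIn.
def contains_sequence_py (password : String) : Bool :=
  let sequences : List String := ["abcdefghijklmnopqrstuvwxyz", "0123456789"]
  sequences.any (fun seq =>
    (PySem.List.pyRange 0 (PySem.Str.len seq - 2) 1).any (fun i =>
      PySem.Chars.isIn (PySem.Chars.lower (PySem.List.slice seq.toList (some i) (some (i + 3))))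
        (PySem.Chars.lower password.toList)))

-- ===== PORT B =====
-- Python str comparison / ord arithmetic is code-point comparison: Char.toNat is exact.
def pvTriple (a b c : Char) : Bool :=
  (decide (b.toNat = a.toNat + 1) && decide (c.toNat = b.toNat + 1)) &&
    ((decide ('a'.toNat ≤ a.toNat) && decide (c.toNat ≤ 'z'.toNat)) ||
     (decide ('0'.toNat ≤ a.toNat) && decide (c.toNat ≤ '9'.toNat)))

-- the 'for a, b, c in zip(s, s[1:], s[2:])' loop with early return
def pvScan : List Char → Bool
  | a :: b :: c :: rest => pvTriple a b c || pvScan (b :: c :: rest)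
  | _ => false

def contains_sequence_py_alt (password : String) : Bool :=
  pvScan (PySem.Chars.lower password.toList)

-- ===== PRECONDITION & SPEC =====
def Spec_contains_sequence_py (password : String) (out : Bool) : Prop := out = contains_sequence_py_alt password
instance (password : String) (out : Bool) : Decidable (Spec_contains_sequence_py password out) := by unfold Spec_contains_sequence_py; infer_instance

-- ===== CLAIM (what is proved, stated in full; the proofs are below) =====
def Claim_equal_contains_sequence_py : Prop := ∀ (password : String), Dom_contains_sequence_py password → Spec_contains_sequence_py password (contains_sequence_py password)

-- ===== LEMMAS AND PROOFS =====

-- the 32 reference triples A searches for, as lists of characters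
def tripleList : List (List Char) := ["abc", "bcd", "cde", "def", "efg", "fgh", "ghi", "hij", "ijk", "jkl", "klm", "lmn", "mno", "nop", "opq", "pqr", "qrs", "rst", "stu", "tuv", "uvw", "vwx", "wxy", "xyz", "012", "123", "234", "345", "456", "567", "678", "789"].map String.toList

-- A's nested any-loops over literal data reduce definitionally to a fixed tree of isIn tests
set_option maxHeartbeats 1600000 in
lemma pvA_eq_tree (p : String) :
    contains_sequence_py p =
      (fun low => ((PySem.Chars.isIn "abc".toList low || (PySem.Chars.isIn "bcd".toList low || (PySem.Chars.isIn "cde".toList low || (PySem.Chars.isIn "def".toList low || (PySem.Chars.isIn "efg".toList low || (PySem.Chars.isIn "fgh".toList low || (PySem.Chars.isIn "ghi".toList low || (PySem.Chars.isIn "hij".toList low || (PySem.Chars.isIn "ijk".toList low || (PySem.Chars.isIn "jkl".toList low || (PySem.Chars.isIn "klm".toList low || (PySem.Chars.isIn "lmn".toList low || (PySem.Chars.isIn "mno".toList low || (PySem.Chars.isIn "nop".toList low || (PySem.Chars.isIn "opq".toList low || (PySem.Chars.isIn "pqr".toList low || (PySem.Chars.isIn "qrs".toList low || (PySem.Chars.isIn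 "rst".toList low || (PySem.Chars.isIn "stu".toList low || (PySem.Chars.isIn "tuv".toList low || (PySem.Chars.isIn "uvw".toList low || (PySem.Chars.isIn "vwx".toList low || (PySem.Chars.isIn "wxy".toList low || (PySem.Chars.isIn "xyz".toList low || false)))))))))))))))))))))))) ||
      ((PySem.Chars.isIn "012".toList low || (PySem.Chars.isIn "123".toList low || (PySem.Chars.isIn "234".toList low || (PySem.Chars.isIn "345".toList low || (PySem.Chars.isIn "456".toList low || (PySem.Chars.isIn "567".toList low || (PySem.Chars.isIn "678".toList low || (PySem.Chars.isIn "789".toList low || false)))))))) || false))) (PySem.Chars.lower p.toList) := rfl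

set_option maxHeartbeats 1600000 in
lemma pvTripleList_any_eq_tree (p : String) :
    tripleList.any (fun t => PySem.Chars.isIn t (PySem.Chars.lower p.toList)) =
      (fun low => (PySem.Chars.isIn "abc".toList low || (PySem.Chars.isIn "bcd".toList low || (PySem.Chars.isIn "cde".toList low || (PySem.Chars.isIn "def".toList low || (PySem.Chars.isIn "efg".toList low || (PySem.Chars.isIn "fgh".toList low || (PySem.Chars.isIn "ghi".toList low || (PySem.Chars.isIn "hij".toList low || (PySem.Chars.isIn "ijk".toList low || (PySem.Chars.isIn "jkl".toList low || (PySem.Chars.isIn "klm".toList low || (PySem.Chars.isIn "lmn".toList low || (PySem.Chars.isIn "mno".toList low || (PySem.Chars.isIn "nop".toList low || (PySem.Chars.isIn "opq".toList low || (PySem.Chars.isIn "pqr".toList low || (PySem.Chars.isIn "qrs".toList low || (PySem.Chars.isIn "rst".toList low || (PySem.Chars.isIn "stu".toList low || (PySem.Chars.isIn "tuv".toList low || (PySem.Chars.isIn "uvw".toList low || (PySem.Chars.isIn "vwx".toList low || (PySem.Chars.isIn "wxy".toList low || (PySem.Chars.isIn "xyz".toList low || (PySem.Chars.isIn "012".toList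 low || (PySem.Chars.isIn "123".toList low || (PySem.Chars.isIn "234".toList low || (PySem.Chars.isIn "345".toList low || (PySem.Chars.isIn "456".toList low || (PySem.Chars.isIn "567".toList low || (PySem.Chars.isIn "678".toList low || (PySem.Chars.isIn "789".toList low || false))))))))))))))))))))))))))))))))) (PySem.Chars.lower p.toList) := rfl

set_option maxHeartbeats 800000 in
lemma pvA_eq_any (p : String) :
    contains_sequence_py p =
      tripleList.any (fun t => PySem.Chars.isIn t (PySem.Chars.lower p.toList)) := by
  rw [pvA_eq_tree, pvTripleList_any_eq_tree]
  simp only [Bool.or_assoc, Bool.or_false]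

lemma pvGood : ∀ t ∈ tripleList,
    (match t with | [x, y, z] => pvTriple x y z | _ => false) = true := by decide

lemma pvScan_iff (l : List Char) : pvScan l = true ↔
    ∃ x y z, [x, y, z] <:+: l ∧ pvTriple x y z = true := by
  induction l with
  | nil =>
    simp only [pvScan, Bool.false_eq_true, false_iff]
    rintro ⟨x, y, z, hinf, -⟩
    have := hinf.length_le; simp at this
  | cons a tail ih =>
    match tail with
    | [] =>
      simp only [pvScan, Bool.false_eq_true, false_iff]
      rintro ⟨x, y, z, hinf, -⟩
      have := hinf.length_le; simp at this
    | [b] =>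
      simp only [pvScan, Bool.false_eq_true, false_iff]
      rintro ⟨x, y, z, hinf, -⟩
      have := hinf.length_le; simp at this
    | b :: c :: rest =>
      rw [show pvScan (a :: b :: c :: rest) = (pvTriple a b c || pvScan (b :: c :: rest)) from rfl,
        Bool.or_eq_true, ih]
      constructor
      · rintro (h | ⟨x, y, z, hinf, ht⟩)
        · exact ⟨a, b, c, ⟨[], rest, rfl⟩, h⟩
        · exact ⟨x, y, z, List.infix_cons hinf, ht⟩
      · rintro ⟨x, y, z, hinf, ht⟩
        rcases List.infix_cons_iff.1 hinf with hpre | hinf'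
        · obtain ⟨rfl, h2⟩ := List.cons_prefix_cons.1 hpre
          obtain ⟨rfl, h3⟩ := List.cons_prefix_cons.1 h2
          obtain ⟨rfl, -⟩ := List.cons_prefix_cons.1 h3
          exact Or.inl ht
        · exact Or.inr ⟨x, y, z, hinf', ht⟩

lemma pvMem_triple (x y z : Char) (h : pvTriple x y z = true) : [x, y, z] ∈ tripleList := by
  have hball : ∀ n < 121, ((97 ≤ n ∧ n + 2 ≤ 122) ∨ (48 ≤ n ∧ n + 2 ≤ 57)) →
      [Char.ofNat n, Char.ofNat (n + 1), Char.ofNat (n + 2)] ∈ tripleList := by decide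
  simp only [pvTriple, Bool.and_eq_true, Bool.or_eq_true, decide_eq_true_eq] at h
  obtain ⟨⟨hy, hz⟩, hb⟩ := h
  have hx := Char.ofNat_toNat x
  have hyy : Char.ofNat (x.toNat + 1) = y := by rw [← hy]; exact Char.ofNat_toNat y
  have hzz : Char.ofNat (x.toNat + 2) = z := by
    rw [show x.toNat + 2 = z.toNat by omega]; exact Char.ofNat_toNat z
  have hb' : (97 ≤ x.toNat ∧ x.toNat + 2 ≤ 122) ∨ (48 ≤ x.toNat ∧ x.toNat + 2 ≤ 57) := by
    rcases hb with ⟨h1, h2⟩ | ⟨h1, h2⟩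
    · exact Or.inl ⟨h1, by change z.toNat ≤ 122 at h2; omega⟩
    · exact Or.inr ⟨h1, by change z.toNat ≤ 57 at h2; omega⟩
  have := hball x.toNat (by omega) hb'
  rwa [hx, hyy, hzz] at this

lemma pvMain (p : String) : contains_sequence_py p = contains_sequence_py_alt p := by
  rw [Bool.eq_iff_iff, pvA_eq_any, List.any_eq_true]
  unfold contains_sequence_py_alt
  rw [pvScan_iff]
  constructor
  · rintro ⟨t, ht, hin⟩
    have hg := pvGood t ht
    have hinf := (PySem.Chars.isIn_iff_infix _ _).1 hin
    rcases t with _ | ⟨x, _ | ⟨y, _ | ⟨z, _ | w⟩⟩⟩ <;> simp at hg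
    exact ⟨x, y, z, hinf, hg⟩
  · rintro ⟨x, y, z, hinf, ht⟩
    exact ⟨[x, y, z], pvMem_triple x y z ht, (PySem.Chars.isIn_iff_infix _ _).2 hinf⟩

-- ===== VERDICT (by name: the statement is the Claim_ definition above) =====
theorem contains_sequence_py_spec : Claim_equal_contains_sequence_py := by
  intro password _
  unfold Spec_contains_sequence_py
  exact pvMain password
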